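-- pv_equiv track=rewrite | github.com/kennymckormick/pyskl | pyskl/models/transformers/skeletr.py | _legal_g
-- ===== SOURCE A (Python) =====
-- def _legal_g(s):
--     if '+' in s:
--         grans = s.split('+')
--         for s in grans:
--             if not (len(s) == 2 and s[0] in '124T' and s[1] in '1PV'):
--                 return False
--         return True
--     return len(s) == 2 and s[0] in '124T' and s[1] in '1PV'
-- ===== SOURCE B (Python) =====
-- def _legal_g(s):
--     # Iterative descent over the grammar tok ('+' tok)* with tok = [124T][1PV]:
--     # consume one two-char token per step, then either end or a '+' separator.
--     i, n = 0, len(s)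
--     while True:
--         if n - i < 2 or s[i] not in '124T' or s[i + 1] not in '1PV':
--             return False
--         i += 2
--         if i == n:
--             return True
--         if s[i] != '+':
--             return False
--         i += 1
-- ===== Notes on version B (the rewrite author's own statement) =====
-- stated objective: alternative
-- what changed: Replaces the branch on '+' presence plus split-into-parts-and-check loop by a single recursive-descent parse of the grammar tok ('+' tok)* consuming the string left to right.
import Mathlib
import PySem

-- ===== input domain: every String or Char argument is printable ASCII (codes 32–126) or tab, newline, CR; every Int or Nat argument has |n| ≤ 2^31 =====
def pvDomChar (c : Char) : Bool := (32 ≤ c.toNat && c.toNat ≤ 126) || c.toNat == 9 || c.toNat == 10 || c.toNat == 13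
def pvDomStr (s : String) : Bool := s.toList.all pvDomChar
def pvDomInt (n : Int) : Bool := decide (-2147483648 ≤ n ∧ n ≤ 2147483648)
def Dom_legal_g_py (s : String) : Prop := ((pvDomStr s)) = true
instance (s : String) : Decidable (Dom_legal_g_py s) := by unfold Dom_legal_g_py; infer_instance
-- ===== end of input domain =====

-- B replaces A's branch on '+' plus split-and-check-parts loop by a single
-- recursive-descent parse of the grammar tok ('+' tok)*; alternative, same cost.

-- ===== PORT A =====
-- len(s) == 2 and s[0] in '124T' and s[1] in '1PV'  (short-circuit: indexing only after the length test)
def tokOkA (t : List Char) : Bool :=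
  (t.length == 2) &&
  (match PySem.List.pyGet? t 0 with
   | some c => PySem.Chars.isIn [c] ['1', '2', '4', 'T']
   | none => false) &&
  (match PySem.List.pyGet? t 1 with
   | some c => PySem.Chars.isIn [c] ['1', 'P', 'V']
   | none => false)

-- for s in grans: if not (...): return False / return True
def loopA : List (List Char) → Bool
  | [] => true
  | t :: ts => if !(tokOkA t) then false else loopA ts

def legal_g_py (s : String) : Bool :=
  if PySem.Str.isIn "+" s then
    match PySem.Chars.split? s.toList ['+'] with  -- s.split('+'); sep nonempty, never none
    | some grans => loopA grans
    | none => false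
  else
    tokOkA s.toList

-- ===== PORT B =====
-- one loop iteration of Source B = one unfolding: the n - i < 2 test plus s[i]/s[i+1]
-- access is the match on the two leading unconsumed chars; advancing i is recursing
-- on the remaining suffix (tail recursion = the while loop).
def okB : List Char → Bool
  | c0 :: c1 :: rest =>
    if !(PySem.Chars.isIn [c0] ['1', '2', '4', 'T']) || !(PySem.Chars.isIn [c1] ['1', 'P', 'V']) then
      false
    else
      match rest with
      | [] => true
      | r :: rest' => (r == '+') && okB rest'
  | _ => false

def legal_g_py_alt (s : String) : Bool := okB s.toList

-- ===== PRECONDITION & SPEC =====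
def Spec_legal_g_py (s : String) (out : Bool) : Prop := out = legal_g_py_alt s
instance (s : String) (out : Bool) : Decidable (Spec_legal_g_py s out) := by unfold Spec_legal_g_py; infer_instance

-- ===== CLAIM (what is proved, stated in full; the proofs are below) =====
def Claim_equal_legal_g_py : Prop := ∀ (s : String), Dom_legal_g_py s → Spec_legal_g_py s (legal_g_py s)

-- ===== LEMMAS AND PROOFS =====

-- structural model of s.split('+'): pieces pre cs are the '+'-separated parts of
-- pre ++ cs, the first part extending pre
def pieces : List Char → List Char → List (List Char)
  | pre, [] => [pre]
  | pre, c :: rest => if c = '+' then pre :: pieces [] rest else pieces (pre ++ [c]) rest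

theorem splitOn_go_eq (fuel : Nat) :
    ∀ (l cur : List Char) (acc : List (List Char)), l.length < fuel →
      PySem.Chars.splitOn.go ['+'] fuel l cur acc = acc.reverse ++ pieces cur.reverse l := by
  induction fuel with
  | zero => intro l cur acc h; omega
  | succ n ih =>
    intro l cur acc h
    cases l with
    | nil => simp [PySem.Chars.splitOn.go, pieces]
    | cons c rest =>
      by_cases hc : c = '+'
      · subst hc
        rw [show PySem.Chars.splitOn.go ['+'] (n+1) ('+' :: rest) cur acc
              = PySem.Chars.splitOn.go ['+'] n rest [] (cur.reverse :: acc) by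
            simp [PySem.Chars.splitOn.go, List.isPrefixOf]]
        rw [ih rest [] (cur.reverse :: acc) (by simpa using h)]
        simp [pieces]
      · have hc' : '+' ≠ c := Ne.symm hc
        rw [show PySem.Chars.splitOn.go ['+'] (n+1) (c :: rest) cur acc
              = PySem.Chars.splitOn.go ['+'] n rest (c :: cur) acc by
            simp [PySem.Chars.splitOn.go, List.isPrefixOf, hc']]
        rw [ih rest (c :: cur) acc (by simpa using h)]
        simp [pieces, hc]

theorem splitOn_eq_pieces (cs : List Char) :
    PySem.Chars.splitOn cs ['+'] = pieces [] cs := by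
  have := splitOn_go_eq (cs.length + 1) cs [] [] (by omega)
  simpa [PySem.Chars.splitOn] using this

theorem pieces_head (cs : List Char) : ∀ pre, ∃ t tl, pieces pre cs = (pre ++ t) :: tl := by
  induction cs with
  | nil => intro pre; exact ⟨[], [], by simp [pieces]⟩
  | cons c rest ih =>
    intro pre
    by_cases hc : c = '+'
    · exact ⟨[], pieces [] rest, by simp [pieces, hc]⟩
    · obtain ⟨t, tl, ht⟩ := ih (pre ++ [c])
      exact ⟨c :: t, tl, by simp [pieces, hc, ht]⟩

theorem pieces_no_plus (cs : List Char) (h : '+' ∉ cs) : ∀ pre, pieces pre cs = [pre ++ cs] := by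
  induction cs with
  | nil => intro pre; simp [pieces]
  | cons c rest ih =>
    intro pre
    have hc : c ≠ '+' := fun hc => h (hc ▸ List.mem_cons_self)
    have hrest : '+' ∉ rest := fun hm => h (List.mem_cons_of_mem _ hm)
    simp [pieces, hc, ih hrest]

theorem okB_cons (c0 c1 : Char) (rest : List Char) : okB (c0 :: c1 :: rest) =
    (if !(PySem.Chars.isIn [c0] ['1', '2', '4', 'T']) || !(PySem.Chars.isIn [c1] ['1', 'P', 'V']) then false
     else match rest with | [] => true | r :: rest' => (r == '+') && okB rest') := by
  rw [okB.eq_def]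

theorem tokOkA_pair (a b : Char) :
    tokOkA [a, b] = (PySem.Chars.isIn [a] ['1', '2', '4', 'T'] &&
                     PySem.Chars.isIn [b] ['1', 'P', 'V']) := by
  simp [tokOkA, PySem.List.pyGet?, PySem.List.pyIdx?]

theorem loop_pieces_eq_okB : ∀ (n : Nat) (cs : List Char), cs.length ≤ n →
    loopA (pieces [] cs) = okB cs := by
  intro n
  induction n with
  | zero =>
    intro cs h
    have : cs = [] := List.eq_nil_of_length_eq_zero (by omega)
    subst this
    simp [pieces, loopA, okB, tokOkA]
  | succ n ih =>
    intro cs h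
    match cs with
    | [] => simp [pieces, loopA, okB, tokOkA]
    | [c] =>
      by_cases hc : c = '+'
      · simp [pieces, hc, loopA, tokOkA, okB]
      · simp [pieces, hc, loopA, tokOkA, okB]
    | a :: b :: rest =>
      have hP1 : PySem.Chars.isIn ['+'] ['1', '2', '4', 'T'] = false := by decide
      have hP2 : PySem.Chars.isIn ['+'] ['1', 'P', 'V'] = false := by decide
      rw [okB_cons]
      by_cases ha : a = '+'
      · subst ha
        simp [pieces, loopA, tokOkA, hP1]
      · by_cases hb : b = '+'
        · subst hb
          have hpc : pieces [] (a :: '+' :: rest) = [a] :: pieces [] rest := by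
            simp [pieces, ha]
          rw [hpc]
          simp [loopA, tokOkA, hP2]
        · have hstep : pieces [] (a :: b :: rest) = pieces [a, b] rest := by
            simp [pieces, ha, hb]
          match rest with
          | [] =>
            rw [hstep]
            simp only [pieces, loopA, tokOkA_pair]
            cases hA : PySem.Chars.isIn [a] ['1', '2', '4', 'T'] <;>
              cases hB : PySem.Chars.isIn [b] ['1', 'P', 'V'] <;> simp
          | r :: rest' =>
            by_cases hr : r = '+'
            · subst hr
              have hpc : pieces [a, b] ('+' :: rest') = [a, b] :: pieces [] rest' := by
                simp [pieces]
              rw [hstep, hpc]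
              have hih := ih rest' (by simp at h; omega)
              simp only [loopA, tokOkA_pair, hih]
              cases hA : PySem.Chars.isIn [a] ['1', '2', '4', 'T'] <;>
                cases hB : PySem.Chars.isIn [b] ['1', 'P', 'V'] <;> simp
            · have hpc : pieces [a, b] (r :: rest') = pieces [a, b, r] rest' := by
                simp [pieces, hr]
              rw [hstep, hpc]
              obtain ⟨t, tl, ht⟩ := pieces_head rest' [a, b, r]
              rw [ht]
              have hlen : tokOkA (a :: b :: r :: t) = false := by
                simp [tokOkA]
              simp [loopA, hlen, hr]

theorem not_mem_of_isIn_false (cs : List Char) (h : PySem.Chars.isIn ['+'] cs = false) :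
    '+' ∉ cs := by
  intro hm
  have : PySem.Chars.isIn ['+'] cs = true :=
    (PySem.Chars.isIn_iff_infix ['+'] cs).mpr ((List.singleton_infix_iff '+' cs).mpr hm)
  rw [this] at h
  exact absurd h (by simp)

-- ===== VERDICT (by name: the statement is the Claim_ definition above) =====
theorem legal_g_py_spec : Claim_equal_legal_g_py := by
  intro s _
  unfold Spec_legal_g_py legal_g_py legal_g_py_alt
  by_cases h : PySem.Str.isIn "+" s = true
  · rw [if_pos h]
    have hsplit : PySem.Chars.split? s.toList ['+'] = some (PySem.Chars.splitOn s.toList ['+']) := by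
      simp [PySem.Chars.split?]
    rw [hsplit, splitOn_eq_pieces]
    exact loop_pieces_eq_okB s.toList.length s.toList le_rfl
  · rw [if_neg h]
    have hf : PySem.Str.isIn "+" s = false := eq_false_of_ne_true h
    have hc : PySem.Chars.isIn ['+'] s.toList = false := by simpa using hf
    have hnm : '+' ∉ s.toList := not_mem_of_isIn_false s.toList hc
    have hmain := loop_pieces_eq_okB s.toList.length s.toList le_rfl
    rw [pieces_no_plus s.toList hnm []] at hmain
    simpa [loopA] using hmain
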